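-- pv_equiv track=rewrite | github.com/GVMBT/seo-master | keyboards/inline.py | detect_active_preset
-- ===== SOURCE A (Python) =====
-- _PRESETS: dict[str, tuple[str, list[str], list[str], int]] = {
--     "1w": ("1 раз/нед", ["wed"], ["10:00"], 1),
--     "3w": ("3 раза/нед", ["mon", "wed", "fri"], ["10:00"], 1),
--     "daily": ("Каждый день", ["mon", "tue", "wed", "thu", "fri", "sat", "sun"], ["10:00"], 1),
-- }
--
-- def detect_active_preset(schedule_days: list[str], posts_per_day: int) -> str | None:
--     """Match current schedule parameters to a preset key.
--
--     Returns preset key ("1w", "3w", "daily") or "manual" if no preset matches.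
--     Returns None if schedule_days is empty or posts_per_day <= 0 (no schedule).
--     """
--     if not schedule_days or posts_per_day <= 0:
--         return None
--
--     day_set = set(schedule_days)
--     for key, (_label, days, _times, ppd) in _PRESETS.items():
--         if day_set == set(days) and posts_per_day == ppd:
--             return key
--     return "manual"
-- ===== SOURCE B (Python) =====
-- _PRESETS: dict[str, tuple[str, list[str], list[str], int]] = {
--     "1w": ("1 раз/нед", ["wed"], ["10:00"], 1),
--     "3w": ("3 раза/нед", ["mon", "wed", "fri"], ["10:00"], 1),
--     "daily": ("Каждый день", ["mon", "tue", "wed", "thu", "fri", "sat", "sun"], ["10:00"], 1),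
-- }
--
-- # Reverse index built once: (day-set, posts-per-day) -> preset key.
-- _PRESET_LOOKUP = {
--     (frozenset(days), ppd): key
--     for key, (_label, days, _times, ppd) in _PRESETS.items()
-- }
--
-- def detect_active_preset(schedule_days: list[str], posts_per_day: int) -> str | None:
--     if not schedule_days or posts_per_day <= 0:
--         return None
--     return _PRESET_LOOKUP.get((frozenset(schedule_days), posts_per_day), "manual")
-- ===== Notes on version B (the rewrite author's own statement) =====
-- stated objective: idiomatic
-- what changed: Replaces the per-call scan over _PRESETS (building set(days) for each preset and comparing) with a module-level reverse index keyed by (frozenset(days), posts_per_day) and a single dict .get with 'manual' default.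
import Mathlib
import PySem

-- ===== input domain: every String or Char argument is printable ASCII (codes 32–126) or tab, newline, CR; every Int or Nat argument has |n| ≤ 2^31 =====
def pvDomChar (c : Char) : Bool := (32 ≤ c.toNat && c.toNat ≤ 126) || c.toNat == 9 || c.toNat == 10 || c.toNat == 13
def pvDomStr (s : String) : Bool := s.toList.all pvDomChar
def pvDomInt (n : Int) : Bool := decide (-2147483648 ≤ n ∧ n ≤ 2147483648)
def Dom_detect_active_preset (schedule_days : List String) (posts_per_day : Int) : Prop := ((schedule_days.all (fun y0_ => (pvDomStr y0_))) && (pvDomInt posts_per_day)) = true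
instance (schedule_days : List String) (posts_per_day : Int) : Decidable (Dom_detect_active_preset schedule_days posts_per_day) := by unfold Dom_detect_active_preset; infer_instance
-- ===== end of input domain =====

-- B replaces A's per-call scan over the presets by a precomputed reverse index ((day-set, ppd) -> key) and one lookup; return values are proved identical.

-- ===== PORT A =====
-- _PRESETS.items(), in insertion order: (key, (label, days, times, ppd))
def pvPresets : List (String × (String × List String × List String × Int)) :=
  [("1w", ("1 раз/нед", ["wed"], ["10:00"], 1)),
   ("3w", ("3 раза/нед", ["mon", "wed", "fri"], ["10:00"], 1)),
   ("daily", ("Каждый день", ["mon", "tue", "wed", "thu", "fri", "sat", "sun"], ["10:00"], 1))]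

-- the for-loop with early return: first matching preset key, else "manual"
def pvScan (daySet : PySem.Set String) (posts_per_day : Int)
    : List (String × (String × List String × List String × Int)) → String
  | [] => "manual"
  | (key, (_label, days, _times, ppd)) :: rest =>
      if PySem.Set.equal daySet (PySem.Set.ofList days) && posts_per_day == ppd then key
      else pvScan daySet posts_per_day rest

def detect_active_preset (schedule_days : List String) (posts_per_day : Int) : Option String :=
  if schedule_days = [] ∨ posts_per_day ≤ 0 then none
  else some (pvScan (PySem.Set.ofList schedule_days) posts_per_day pvPresets)

-- ===== PORT B =====
-- _PRESET_LOOKUP: module-level reverse index {(frozenset(days), ppd): key}; dict lookup = first key match,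
-- frozenset equality = PySem.Set.equal
def pvPresetLookup : List ((PySem.Set String × Int) × String) :=
  [((PySem.Set.ofList ["wed"], 1), "1w"),
   ((PySem.Set.ofList ["mon", "wed", "fri"], 1), "3w"),
   ((PySem.Set.ofList ["mon", "tue", "wed", "thu", "fri", "sat", "sun"], 1), "daily")]

def detect_active_preset_alt (schedule_days : List String) (posts_per_day : Int) : Option String :=
  if schedule_days = [] ∨ posts_per_day ≤ 0 then none
  else
    some ((((pvPresetLookup.find?
        (fun kv => PySem.Set.equal (PySem.Set.ofList schedule_days) kv.1.1 && posts_per_day == kv.1.2)).map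
        (·.2)).getD "manual"))

-- ===== PRECONDITION & SPEC =====
def Spec_detect_active_preset (schedule_days : List String) (posts_per_day : Int) (out : Option String) : Prop := out = detect_active_preset_alt schedule_days posts_per_day
instance (schedule_days : List String) (posts_per_day : Int) (out : Option String) : Decidable (Spec_detect_active_preset schedule_days posts_per_day out) := by unfold Spec_detect_active_preset; infer_instance

-- ===== CLAIM (what is proved, stated in full; the proofs are below) =====
def Claim_equal_detect_active_preset : Prop := ∀ (schedule_days : List String) (posts_per_day : Int), Dom_detect_active_preset schedule_days posts_per_day → Spec_detect_active_preset schedule_days posts_per_day (detect_active_preset schedule_days posts_per_day)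

-- ===== LEMMAS AND PROOFS =====

-- ===== VERDICT (by name: the statement is the Claim_ definition above) =====
theorem detect_active_preset_spec : Claim_equal_detect_active_preset := by
  intro ds p _
  unfold Spec_detect_active_preset detect_active_preset detect_active_preset_alt
  by_cases h : ds = [] ∨ p ≤ 0
  · simp [h]
  · simp only [if_neg h]
    by_cases h1 : (PySem.Set.equal (PySem.Set.ofList ds) (PySem.Set.ofList ["wed"]) && p == 1) = true <;>
    by_cases h2 : (PySem.Set.equal (PySem.Set.ofList ds) (PySem.Set.ofList ["mon", "wed", "fri"]) && p == 1) = true <;>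
    by_cases h3 : (PySem.Set.equal (PySem.Set.ofList ds) (PySem.Set.ofList ["mon", "tue", "wed", "thu", "fri", "sat", "sun"]) && p == 1) = true <;>
    simp [pvScan, pvPresets, pvPresetLookup, List.find?, h1, h2, h3]
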